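-- pv_equiv track=rewrite | github.com/geraldpe/cistercian_cipher | criptage_cistercien.py | decompose_number_in_tenth_base
-- ===== SOURCE A (Python) =====
-- def decompose_number_in_tenth_base(number: int) -> list:
--     """
--     décompose un nombre de quatre digits maximum (entre 1 et 9999) en une liste de 4 éléments représentant
--     les unités, les dizaines, les centaines et enfin les miliers
--     """
--     result = [0]*4
--     index = 3
--     while number != 0 and index > -1:
--         result[index] = number % 10
--         number //= 10
--         index -= 1
--
--     return result
-- ===== SOURCE B (Python) =====
-- def decompose_number_in_tenth_base(number: int) -> list:
--     return [
--         (number // 1000) % 10,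
--         (number // 100) % 10,
--         (number // 10) % 10,
--         number % 10,
--     ]
-- ===== Notes on version B (the rewrite author's own statement) =====
-- stated objective: simpler
-- what changed: Replaced the mutating strip-and-divide while loop over a preallocated result list with four independent closed-form digit extractions, each dividing the original number by a fixed power of ten and taking the remainder mod ten.
import Mathlib
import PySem

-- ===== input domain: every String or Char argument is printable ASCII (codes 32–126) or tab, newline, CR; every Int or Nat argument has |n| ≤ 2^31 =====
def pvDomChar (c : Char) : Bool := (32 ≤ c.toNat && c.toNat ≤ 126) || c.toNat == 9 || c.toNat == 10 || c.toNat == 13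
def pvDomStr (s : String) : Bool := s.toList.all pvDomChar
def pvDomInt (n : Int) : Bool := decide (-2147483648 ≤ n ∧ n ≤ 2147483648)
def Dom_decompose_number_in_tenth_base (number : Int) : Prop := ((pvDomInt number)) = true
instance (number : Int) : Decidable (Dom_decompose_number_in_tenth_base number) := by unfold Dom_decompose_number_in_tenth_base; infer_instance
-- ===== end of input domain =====

-- B replaces A's strip-and-divide while loop by four independent closed-form digit extractions; objective: simpler.
-- ===== PORT A =====
-- the while loop of A: state (result, number, index), condition number != 0 and index > -1
def pvALoop (number : Int) (result : List Int) (index : Int) : List Int :=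
  if number ≠ 0 ∧ index > -1 then
    pvALoop (PySem.Int.floordiv number 10)
      (result.set index.toNat (PySem.Int.mod number 10)) (index - 1)
  else result
termination_by (index + 1).toNat
decreasing_by simp_all; omega

def decompose_number_in_tenth_base (number : Int) : List Int :=
  pvALoop number [0, 0, 0, 0] 3

-- ===== PORT B =====
def decompose_number_in_tenth_base_alt (number : Int) : List Int :=
  [ PySem.Int.mod (PySem.Int.floordiv number 1000) 10,
    PySem.Int.mod (PySem.Int.floordiv number 100) 10,
    PySem.Int.mod (PySem.Int.floordiv number 10) 10,
    PySem.Int.mod number 10 ]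

-- ===== PRECONDITION & SPEC =====
def Spec_decompose_number_in_tenth_base (number : Int) (out : List Int) : Prop := out = decompose_number_in_tenth_base_alt number
instance (number : Int) (out : List Int) : Decidable (Spec_decompose_number_in_tenth_base number out) := by unfold Spec_decompose_number_in_tenth_base; infer_instance

-- ===== CLAIM (what is proved, stated in full; the proofs are below) =====
def Claim_equal_decompose_number_in_tenth_base : Prop := ∀ (number : Int), Dom_decompose_number_in_tenth_base number → Spec_decompose_number_in_tenth_base number (decompose_number_in_tenth_base number)

-- ===== LEMMAS AND PROOFS =====
theorem pv_fd10 (a : Int) : PySem.Int.floordiv a 10 = a / 10 :=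
  PySem.Int.floordiv_eq_ediv_of_pos (by norm_num)

theorem pv_md10 (a : Int) : PySem.Int.mod a 10 = a % 10 :=
  PySem.Int.mod_eq_emod_of_pos (by norm_num)

-- ===== VERDICT (by name: the statement is the Claim_ definition above) =====
theorem decompose_number_in_tenth_base_spec : Claim_equal_decompose_number_in_tenth_base := by
  intro n _
  unfold Spec_decompose_number_in_tenth_base decompose_number_in_tenth_base
    decompose_number_in_tenth_base_alt
  rw [pvALoop]; split_ifs with h1
  · rw [pvALoop]; split_ifs with h2
    · rw [pvALoop]; split_ifs with h3
      · rw [pvALoop]; split_ifs with h4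
        · rw [pvALoop]; split_ifs with h5
          · simp only [pv_fd10] at h5
            omega
          · simp only [pv_fd10, pv_md10] at h1 h2 h3 h4 ⊢
            simp
            all_goals omega
        · simp only [pv_fd10, pv_md10] at h1 h2 h3 h4 ⊢
          simp
          all_goals omega
      · simp only [pv_fd10, pv_md10] at h1 h2 h3 ⊢
        simp
        all_goals omega
    · simp only [pv_fd10, pv_md10] at h1 h2 ⊢
      simp
      all_goals omega
  · have hn : n = 0 := by omega
    subst hn; simp
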